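-- pv_equiv track=rewrite | github.com/GTerglav/programiranje-1 | izpiti/2018-07-06/resevanj5.py | vsotno_simetricen
-- ===== SOURCE A (Python) =====
-- def vsotno_simetricen(niz):
--     n = len(niz) // 2
--     if len(niz) % 2 == 0:
--         leva = 0
--         for i in niz[:n]:
--             leva += int(i)
--         desna = 0
--         for j in niz[n:]:
--             desna += int(j)
--         return desna == leva
--     else:
--         leva = 0
--         for i in niz[:n]:
--             leva += int(i)
--         desna = 0
--         for j in niz[n+1:]:
--             desna += int(j)
--         return desna == leva
-- ===== SOURCE B (Python) =====
-- def vsotno_simetricen(niz):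
--     i, j = 0, len(niz) - 1
--     leva = 0
--     desna = 0
--     while i < j:
--         leva += int(niz[i])
--         desna += int(niz[j])
--         i += 1
--         j -= 1
--     return leva == desna
-- ===== Notes on version B (the rewrite author's own statement) =====
-- stated objective: alternative
-- what changed: Replaces the parity branch with its four slice-and-accumulate loops by a single two-pointer pass that sums digits converging from both ends (strict i<j skips the odd middle), with no slicing.
import Mathlib
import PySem

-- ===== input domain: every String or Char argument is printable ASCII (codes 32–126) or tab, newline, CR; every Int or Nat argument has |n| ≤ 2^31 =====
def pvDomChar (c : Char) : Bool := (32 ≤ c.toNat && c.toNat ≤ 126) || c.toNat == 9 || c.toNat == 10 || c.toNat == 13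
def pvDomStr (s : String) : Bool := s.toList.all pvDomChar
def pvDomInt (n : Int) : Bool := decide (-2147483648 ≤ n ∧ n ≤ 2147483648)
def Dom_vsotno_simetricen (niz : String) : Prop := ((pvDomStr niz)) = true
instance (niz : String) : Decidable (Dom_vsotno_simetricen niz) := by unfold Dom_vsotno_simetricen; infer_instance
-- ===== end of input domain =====

-- B replaces A's parity branch with four slice loops by one two-pointer pass from both ends (alternative decomposition, same cost).

-- int(c) for a one-character string c; total form with default 0, used only under
-- Pre_vsotno_simetricen (all characters are digits, where PySem.Int.ofChars? returns some).
def pyIntChar (c : Char) : Int := (PySem.Int.ofChars? [c]).getD 0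

-- ===== PORT A =====
def vsotno_simetricen (niz : String) : Bool :=
  let l := niz.toList
  let n : Nat := l.length / 2          -- len(niz) // 2, exact for a nonnegative length (PySem.Int.floordiv_natCast)
  if l.length % 2 == 0 then
    let leva := (PySem.List.slice l none (some (n : Int))).foldl (fun a c => a + pyIntChar c) 0
    let desna := (PySem.List.slice l (some (n : Int)) none).foldl (fun a c => a + pyIntChar c) 0
    desna == leva
  else
    let leva := (PySem.List.slice l none (some (n : Int))).foldl (fun a c => a + pyIntChar c) 0
    let desna := (PySem.List.slice l (some ((n : Int) + 1)) none).foldl (fun a c => a + pyIntChar c) 0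
    desna == leva

-- ===== PORT B =====
-- while i < j: leva += int(niz[i]); desna += int(niz[j]); i += 1; j -= 1
def twoPtrLoop (l : List Char) (i j : Int) (leva desna : Int) : Bool :=
  if i < j then
    twoPtrLoop l (i + 1) (j - 1)
      (leva + pyIntChar (PySem.List.pyGetD l i ' '))
      (desna + pyIntChar (PySem.List.pyGetD l j ' '))
  else
    leva == desna
termination_by (j - i).toNat
decreasing_by omega

def vsotno_simetricen_alt (niz : String) : Bool :=
  twoPtrLoop niz.toList 0 (PySem.List.len niz.toList - 1) 0 0

-- ===== PRECONDITION & SPEC =====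
-- Pre: every character reached by int(·) is an ASCII digit — the middle character of an odd-length
-- string is skipped by both programs, so it may be anything; elsewhere int(c) raises ValueError.
def Pre_vsotno_simetricen (niz : String) : Prop :=
  (((niz.toList.take (niz.toList.length / 2)).all Char.isDigit) &&
   ((niz.toList.drop ((niz.toList.length + 1) / 2)).all Char.isDigit)) = true
instance (niz : String) : Decidable (Pre_vsotno_simetricen niz) := by unfold Pre_vsotno_simetricen; infer_instance

def pvWitness_vsotno_simetricen : String := "1230"

def Spec_vsotno_simetricen (niz : String) (out : Bool) : Prop := out = vsotno_simetricen_alt niz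
instance (niz : String) (out : Bool) : Decidable (Spec_vsotno_simetricen niz out) := by unfold Spec_vsotno_simetricen; infer_instance

-- ===== CLAIM (what is proved, stated in full; the proofs are below) =====
def Claim_equal_vsotno_simetricen : Prop := ∀ (niz : String), Dom_vsotno_simetricen niz → Pre_vsotno_simetricen niz → Spec_vsotno_simetricen niz (vsotno_simetricen niz)

-- ===== LEMMAS AND PROOFS =====

-- digit-sum of a character list
def sumC (l : List Char) : Int := (l.map pyIntChar).sum

-- the segment l[a:b] for natural bounds
def seg (l : List Char) (a b : Nat) : List Char := (l.drop a).take (b - a)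

theorem foldl_sumC (l : List Char) (a : Int) :
    l.foldl (fun a c => a + pyIntChar c) a = a + sumC l := by
  induction l generalizing a with
  | nil => simp [sumC]
  | cons x xs ih => simp [List.foldl_cons, ih, sumC]; ring

theorem beq_decide (a b : Int) : (a == b) = decide (a = b) := by
  by_cases h : a = b <;> simp [h]

-- the two-pointer loop computes the comparison of the two half digit-sums
theorem seg_zero (l : List Char) (x : Nat) : seg l 0 x = l.take x := by simp [seg]

theorem seg_to_len (l : List Char) (a : Nat) : seg l a l.length = l.drop a := by
  simp only [seg]
  exact List.take_of_length_le (by simp)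

theorem twoPtr_eq (l : List Char) :
    ∀ (k i j : Nat) (a b : Int), j - i ≤ k → j < l.length →
    twoPtrLoop l (i : Int) (j : Int) a b =
      decide (a + sumC (seg l i (i + (j + 1 - i) / 2)) =
              b + sumC (seg l (j + 1 - (j + 1 - i) / 2) (j + 1))) := by
  intro k
  induction k with
  | zero =>
    intro i j a b hk hj
    have hij : j ≤ i := by omega
    have ht : (j + 1 - i) / 2 = 0 := by omega
    rw [twoPtrLoop]
    have : ¬ ((i : Int) < (j : Int)) := by exact_mod_cast Nat.not_lt.mpr hij
    simp only [this, if_false, ht]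
    simp [seg, sumC, beq_decide]
  | succ k ih =>
    intro i j a b hk hj
    by_cases hij : i < j
    · have hi_len : i < l.length := lt_trans hij hj
      have hjj : 1 ≤ j := by omega
      set t' : Nat := (j - i - 1) / 2 with ht'
      have ht : (j + 1 - i) / 2 = t' + 1 := by omega
      rw [twoPtrLoop]
      have hlt : ((i : Int) < (j : Int)) := by exact_mod_cast hij
      simp only [hlt, if_true]
      have e1 : (i : Int) + 1 = ((i + 1 : Nat) : Int) := by push_cast; ring
      have e2 : (j : Int) - 1 = ((j - 1 : Nat) : Int) := by omega
      rw [e1, e2, ih (i + 1) (j - 1) _ _ (by omega) (by omega)]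
      have ht2 : (j - 1 + 1 - (i + 1)) / 2 = t' := by omega
      rw [ht2, ht]
      have hdrop : l.drop i = l[i] :: l.drop (i + 1) := List.drop_eq_getElem_cons hi_len
      have hleft : sumC (seg l i (i + (t' + 1))) = pyIntChar l[i] + sumC (seg l (i + 1) (i + 1 + t')) := by
        unfold seg
        rw [show i + (t' + 1) - i = t' + 1 by omega, show i + 1 + t' - (i + 1) = t' by omega,
            hdrop, List.take_succ_cons]
        simp [sumC]
      have hright : sumC (seg l (j + 1 - (t' + 1)) (j + 1)) =
          sumC (seg l (j - 1 + 1 - t') (j - 1 + 1)) + pyIntChar l[j] := by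
        unfold seg
        rw [show j + 1 - (t' + 1) = j - t' by omega, show j - 1 + 1 - t' = j - t' by omega,
            show j + 1 - (j - t') = t' + 1 by omega, show j - 1 + 1 - (j - t') = t' by omega]
        have hidx : (l.drop (j - t'))[t']? = some l[j] := by
          rw [List.getElem?_drop, show j - t' + t' = j by omega]
          exact List.getElem?_eq_getElem hj
        rw [List.take_add_one, hidx]
        simp [sumC]
      rw [hleft, hright]
      have gi : PySem.List.pyGetD l (i : Int) ' ' = l[i] := by
        rw [PySem.List.pyGetD_natCast]; exact List.getD_eq_getElem l ' ' hi_len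
      have gj : PySem.List.pyGetD l (j : Int) ' ' = l[j] := by
        rw [PySem.List.pyGetD_natCast]; exact List.getD_eq_getElem l ' ' hj
      rw [gi, gj, decide_eq_decide]
      constructor <;> intro h <;> omega
    · have ht : (j + 1 - i) / 2 = 0 := by omega
      rw [twoPtrLoop]
      have : ¬ ((i : Int) < (j : Int)) := by exact_mod_cast Nat.not_lt.mpr (by omega)
      simp only [this, if_false, ht]
      simp [seg, sumC, beq_decide]

theorem alt_eq (niz : String) :
    vsotno_simetricen_alt niz =
      decide (sumC (niz.toList.take (niz.toList.length / 2)) =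
              sumC (niz.toList.drop (niz.toList.length - niz.toList.length / 2))) := by
  unfold vsotno_simetricen_alt
  rcases h : niz.toList with _ | ⟨c, cs⟩
  · rw [twoPtrLoop]; simp [PySem.List.len, sumC]
  · rw [h] at *
    set l : List Char := c :: cs with hl
    have hlen : 1 ≤ l.length := by simp [hl]
    have e : PySem.List.len l - 1 = ((l.length - 1 : Nat) : Int) := by
      rw [PySem.List.len_eq]; omega
    rw [e]
    have h2 := twoPtr_eq l (l.length - 1) 0 (l.length - 1) 0 0 (by omega) (by omega)
    simp only [Nat.cast_zero] at h2
    rw [h2]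
    rw [show 0 + (l.length - 1 + 1 - 0) / 2 = l.length / 2 by omega,
        show l.length - 1 + 1 - (l.length - 1 + 1 - 0) / 2 = l.length - l.length / 2 by omega,
        show l.length - 1 + 1 = l.length by omega,
        seg_zero, seg_to_len]
    simp

theorem a_eq (niz : String) :
    vsotno_simetricen niz =
      decide (sumC (niz.toList.take (niz.toList.length / 2)) =
              sumC (niz.toList.drop (niz.toList.length - niz.toList.length / 2))) := by
  simp only [vsotno_simetricen]
  by_cases hpar : niz.toList.length % 2 = 0
  · rw [if_pos (beq_iff_eq.mpr hpar)]
    rw [PySem.List.slice_to_natCast, PySem.List.slice_from_natCast,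
        foldl_sumC, foldl_sumC, beq_decide,
        show niz.toList.length - niz.toList.length / 2 = niz.toList.length / 2 by omega,
        decide_eq_decide]
    constructor <;> intro h <;> omega
  · rw [if_neg (fun h => hpar (beq_iff_eq.mp h))]
    rw [PySem.List.slice_to_natCast,
        show ((niz.toList.length / 2 : Nat) : Int) + 1 = ((niz.toList.length / 2 + 1 : Nat) : Int) by push_cast; ring,
        PySem.List.slice_from_natCast,
        foldl_sumC, foldl_sumC, beq_decide,
        show niz.toList.length - niz.toList.length / 2 = niz.toList.length / 2 + 1 by omega,
        decide_eq_decide]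
    constructor <;> intro h <;> omega

-- ===== VERDICT (by name: the statement is the Claim_ definition above) =====
theorem vsotno_simetricen_spec : Claim_equal_vsotno_simetricen := by
  intro niz _ _
  unfold Spec_vsotno_simetricen
  rw [a_eq, alt_eq]
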